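-- pv_equiv track=rewrite | github.com/yashvara/Algorithms | min_max.py | minmaxproblem
-- ===== SOURCE A (Python) =====
-- def minmaxproblem(arr, l, r):
--     if l == r:
--         return (arr[l], arr[l])  # Base case: single element, return as min and max
--
--     elif r == l + 1:
--         if arr[l] < arr[r]:
--             return (arr[l], arr[r])  # Compare two elements and return as min and max
--         else:
--             return (arr[r], arr[l])
--
--     else:
--         mid = (l + r) // 2  # Corrected the calculation of mid using integer division
--
--         # Divide the array into two parts and find min/max for each part
--         arr_min1, arr_max1 = minmaxproblem(arr, l, mid)  # for the left part
--         arr_min2, arr_max2 = minmaxproblem(arr, mid + 1, r)  # for the right part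
--
--         # Return the overall min and max of both parts
--         return (min(arr_min1, arr_min2), max(arr_max1, arr_max2))
-- ===== SOURCE B (Python) =====
-- def minmaxproblem(arr, l, r):
--     cur_min = cur_max = arr[l]
--     for i in range(l + 1, r + 1):
--         cur_min = min(cur_min, arr[i])
--         cur_max = max(cur_max, arr[i])
--     return (cur_min, cur_max)
-- ===== Notes on version B (the rewrite author's own statement) =====
-- stated objective: simpler
-- what changed: Replaced the recursive divide-and-conquer over index halves by a single flat left-to-right scan that keeps a running (min, max) pair.
import Mathlib
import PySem

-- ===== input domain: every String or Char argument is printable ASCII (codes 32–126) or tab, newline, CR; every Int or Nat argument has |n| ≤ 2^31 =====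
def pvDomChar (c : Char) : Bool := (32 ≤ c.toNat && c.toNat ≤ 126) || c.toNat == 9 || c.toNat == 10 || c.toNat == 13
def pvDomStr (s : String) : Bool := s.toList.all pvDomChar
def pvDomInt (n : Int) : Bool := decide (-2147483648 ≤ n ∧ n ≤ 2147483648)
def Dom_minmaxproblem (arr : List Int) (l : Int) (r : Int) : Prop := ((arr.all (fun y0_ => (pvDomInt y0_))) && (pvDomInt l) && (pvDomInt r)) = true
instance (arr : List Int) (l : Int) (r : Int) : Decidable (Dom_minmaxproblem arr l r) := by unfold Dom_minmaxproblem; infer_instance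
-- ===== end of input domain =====

-- B replaces A's divide-and-conquer recursion by one flat running-(min,max) scan (objective: simpler).

-- ===== PORT A =====
-- arr[i] (Python indexing, negative allowed) with a default: Pre_ keeps every access in range.
def pvGetI (arr : List Int) (i : Int) : Int := PySem.List.pyGetD arr i 0

-- Fuel makes the recursion total in Lean; inside Pre_ (l ≤ r) the fuel (r-l)+1 is never exhausted
-- (proved in minmaxGo_eq_runMM below), so this is A's recursion step for step.
def minmaxGo (arr : List Int) : Nat → Int → Int → Int × Int
  | 0, _, _ => (0, 0)
  | fuel + 1, l, r =>
    if l = r then (pvGetI arr l, pvGetI arr l)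
    else if r = l + 1 then
      if pvGetI arr l < pvGetI arr r then (pvGetI arr l, pvGetI arr r)
      else (pvGetI arr r, pvGetI arr l)
    else
      let mid := PySem.Int.floordiv (l + r) 2
      let p1 := minmaxGo arr fuel l mid
      let p2 := minmaxGo arr fuel (mid + 1) r
      (min p1.1 p2.1, max p1.2 p2.2)

def minmaxproblem (arr : List Int) (l : Int) (r : Int) : Int × Int :=
  minmaxGo arr ((r - l).toNat + 1) l r

-- ===== PORT B =====
def pvStep (arr : List Int) (st : Int × Int) (i : Int) : Int × Int :=
  (min st.1 (pvGetI arr i), max st.2 (pvGetI arr i))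

def minmaxproblem_alt (arr : List Int) (l : Int) (r : Int) : Int × Int :=
  let c := pvGetI arr l
  (PySem.List.pyRange (l + 1) (r + 1) 1).foldl (pvStep arr) (c, c)

-- ===== PRECONDITION & SPEC =====
-- Pre_ excludes exactly the inputs on which Python A raises: l > r (unbounded recursion,
-- RecursionError) and index ranges leaving [-len(arr), len(arr)) (IndexError).
def Pre_minmaxproblem (arr : List Int) (l : Int) (r : Int) : Prop :=
  l ≤ r ∧ -(arr.length : Int) ≤ l ∧ r < (arr.length : Int)
instance (arr : List Int) (l : Int) (r : Int) : Decidable (Pre_minmaxproblem arr l r) := by unfold Pre_minmaxproblem; infer_instance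
def pvWitness_minmaxproblem : List Int × Int × Int := ([3, 1, 2], 0, 2)

def Spec_minmaxproblem (arr : List Int) (l : Int) (r : Int) (out : Int × Int) : Prop := out = minmaxproblem_alt arr l r
instance (arr : List Int) (l : Int) (r : Int) (out : Int × Int) : Decidable (Spec_minmaxproblem arr l r out) := by unfold Spec_minmaxproblem; infer_instance

-- ===== CLAIM (what is proved, stated in full; the proofs are below) =====
def Claim_equal_minmaxproblem : Prop := ∀ (arr : List Int) (l : Int) (r : Int), Dom_minmaxproblem arr l r → Pre_minmaxproblem arr l r → Spec_minmaxproblem arr l r (minmaxproblem arr l r)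

-- ===== LEMMAS AND PROOFS =====

-- B's scan over [s, e) (the alt port with e = r+1).
def runMM (arr : List Int) (s e : Int) : Int × Int :=
  (PySem.List.pyRange (s + 1) e 1).foldl (pvStep arr) (pvGetI arr s, pvGetI arr s)

lemma runMM_eq_alt (arr : List Int) (l r : Int) :
    runMM arr l (r + 1) = minmaxproblem_alt arr l r := rfl

lemma pyRange_one_split : ∀ (n : Nat) (a b c : Int), (b - a).toNat = n → a ≤ b → b ≤ c →
    PySem.List.pyRange a c 1 = PySem.List.pyRange a b 1 ++ PySem.List.pyRange b c 1 := by
  intro n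
  induction n with
  | zero =>
    intro a b c hn hab _
    have : a = b := by omega
    subst this
    rw [PySem.List.pyRange_one_eq_nil (le_refl a), List.nil_append]
  | succ n ih =>
    intro a b c hn hab hbc
    have hab' : a < b := by omega
    rw [PySem.List.pyRange_one_cons (by omega : a < c),
        PySem.List.pyRange_one_cons hab', List.cons_append,
        ih (a + 1) b c (by omega) (by omega) hbc]

-- Folding pvStep commutes with a (min a ·, max b ·) shift of the initial accumulator.
lemma foldl_pvStep_init (arr : List Int) : ∀ (is : List Int) (a b c d : Int),
    is.foldl (pvStep arr) (min a c, max b d) =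
      (min a (is.foldl (pvStep arr) (c, d)).1, max b (is.foldl (pvStep arr) (c, d)).2) := by
  intro is
  induction is with
  | nil => intro a b c d; simp
  | cons i is ih =>
    intro a b c d
    simp only [List.foldl_cons, pvStep, min_assoc, max_assoc]
    exact ih a b (min c (pvGetI arr i)) (max d (pvGetI arr i))

lemma runMM_merge (arr : List Int) (s m e : Int) (hsm : s ≤ m) (hme : m + 1 < e) :
    runMM arr s e = (min (runMM arr s (m + 1)).1 (runMM arr (m + 1) e).1,
                     max (runMM arr s (m + 1)).2 (runMM arr (m + 1) e).2) := by
  unfold runMM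
  rw [pyRange_one_split ((m + 1) - (s + 1)).toNat (s + 1) (m + 1) e rfl (by omega) (by omega),
      List.foldl_append]
  set st := (PySem.List.pyRange (s + 1) (m + 1) 1).foldl (pvStep arr)
      (pvGetI arr s, pvGetI arr s) with hst
  rw [PySem.List.pyRange_one_cons (by omega : m + 1 < e), List.foldl_cons]
  have : pvStep arr st (m + 1)
      = (min st.1 (pvGetI arr (m + 1)), max st.2 (pvGetI arr (m + 1))) := rfl
  rw [this, foldl_pvStep_init]

lemma minmaxGo_eq_runMM (arr : List Int) : ∀ (fuel : Nat) (l r : Int),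
    l ≤ r → (r - l).toNat < fuel → minmaxGo arr fuel l r = runMM arr l (r + 1) := by
  intro fuel
  induction fuel with
  | zero => intro l r _ h; omega
  | succ fuel ih =>
    intro l r hlr hfuel
    by_cases h1 : l = r
    · subst h1
      simp [minmaxGo, runMM, PySem.List.pyRange_one_eq_nil (le_refl (l + 1))]
    · by_cases h2 : r = l + 1
      · subst h2
        simp only [minmaxGo, if_neg h1]
        have : l + 1 + 1 = l + 2 := by ring
        rw [runMM, this, show (l + 2 : Int) = (l + 1) + 1 by ring,
            PySem.List.pyRange_one_singleton, List.foldl_cons, List.foldl_nil]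
        by_cases hlt : pvGetI arr l < pvGetI arr (l + 1) <;>
          simp [hlt, pvStep, min_def, max_def] <;> omega
      · have hlr2 : l + 2 ≤ r := by omega
        simp only [minmaxGo, if_neg h1, if_neg h2]
        have hmid : PySem.Int.floordiv (l + r) 2 = (l + r) / 2 :=
          PySem.Int.floordiv_eq_ediv_of_pos (by omega)
        set mid := PySem.Int.floordiv (l + r) 2 with hmiddef
        rw [ih l mid (by omega) (by omega), ih (mid + 1) r (by omega) (by omega)]
        exact (runMM_merge arr l mid (r + 1) (by omega) (by omega)).symm

-- ===== VERDICT (by name: the statement is the Claim_ definition above) =====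
theorem minmaxproblem_spec : Claim_equal_minmaxproblem := by
  intro arr l r _ hpre
  have hlr : l ≤ r := hpre.1
  show minmaxproblem arr l r = minmaxproblem_alt arr l r
  rw [minmaxproblem, minmaxGo_eq_runMM arr ((r - l).toNat + 1) l r hlr (by omega),
      runMM_eq_alt]
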